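-- pv_equiv track=rewrite | github.com/jmazzahacks/loki-reader-core | src/loki_reader_core/client.py | _build_severity_regex
-- ===== SOURCE A (Python) =====
-- def _build_severity_regex(min_severity: str) -> str:
--     """Build regex matching min_severity and all higher severity tiers.
--
--     Canonical order (low to high): trace, debug, info, warn, error, fatal.
--     Aliases: "warning" maps to "warn", "critical" maps to "fatal".
--
--     Args:
--         min_severity: Minimum severity level to include.
--
--     Returns:
--         Pipe-separated regex string (e.g. "error|fatal|critical").
--
--     Raises:
--         ValueError: If min_severity is not a recognized level.
--     """
--     normalized = min_severity.strip().lower()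
--
--     if normalized == "warning":
--         normalized = "warn"
--     if normalized == "critical":
--         normalized = "fatal"
--
--     canonical = ["trace", "debug", "info", "warn", "error", "fatal"]
--     idx = canonical.index(normalized)  # raises ValueError if invalid
--     selected = canonical[idx:]
--
--     expanded = []
--     for level in selected:
--         expanded.append(level)
--         if level == "warn":
--             expanded.append("warning")
--         elif level == "fatal":
--             expanded.append("critical")
--
--     return "|".join(expanded)
-- ===== SOURCE B (Python) =====
-- # Precomputed answer table: each accepted name/alias maps directly to its final
-- # regex string, so the call does no index search, slicing or joining at all.
-- _REGEX = {
--     "trace":    "trace|debug|info|warn|warning|error|fatal|critical",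
--     "debug":    "debug|info|warn|warning|error|fatal|critical",
--     "info":     "info|warn|warning|error|fatal|critical",
--     "warn":     "warn|warning|error|fatal|critical",
--     "warning":  "warn|warning|error|fatal|critical",
--     "error":    "error|fatal|critical",
--     "fatal":    "fatal|critical",
--     "critical": "fatal|critical",
-- }
--
--
-- def _build_severity_regex(min_severity: str) -> str:
--     key = min_severity.strip().lower()
--     try:
--         return _REGEX[key]
--     except KeyError:
--         raise ValueError(f"{key!r} is not in list")
-- ===== Notes on version B (the rewrite author's own statement) =====
-- stated objective: simpler
-- what changed: Replaces the alias rewriting, list.index, slicing and the alias-expanding join loop by a closed-form lookup table mapping every accepted name directly to its finished regex string; the call is just strip/lower and one dict lookup.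
import Mathlib
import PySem

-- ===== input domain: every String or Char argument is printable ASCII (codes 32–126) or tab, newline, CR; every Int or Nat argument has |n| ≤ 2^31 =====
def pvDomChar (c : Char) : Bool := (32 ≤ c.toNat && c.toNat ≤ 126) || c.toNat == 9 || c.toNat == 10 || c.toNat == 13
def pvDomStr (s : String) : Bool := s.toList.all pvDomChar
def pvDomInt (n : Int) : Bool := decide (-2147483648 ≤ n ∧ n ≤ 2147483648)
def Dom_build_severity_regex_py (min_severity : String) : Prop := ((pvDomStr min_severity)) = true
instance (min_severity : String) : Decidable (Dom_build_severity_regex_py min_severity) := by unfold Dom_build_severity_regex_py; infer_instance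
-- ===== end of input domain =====

-- B replaces A's alias rewriting, list.index, slicing and join loop by a precomputed
-- table mapping each accepted name directly to its finished regex string (simpler).

-- ===== PORT A =====
-- A's body after strip().lower(); the ValueError case returns "" and is excluded by Pre_
def pvACore (normalized0 : String) : String :=
  let normalized := if normalized0 = "warning" then "warn" else normalized0
  let normalized := if normalized = "critical" then "fatal" else normalized
  let canonical : List String := ["trace", "debug", "info", "warn", "error", "fatal"]
  match PySem.List.index? canonical normalized with
  | none => ""  -- Python: ValueError (outside Pre_)
  | some idx =>
    let selected := PySem.List.slice canonical (some (idx : Int)) none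
    let expanded := selected.foldl (fun acc level =>
      let acc := acc ++ [level]
      if level = "warn" then acc ++ ["warning"]
      else if level = "fatal" then acc ++ ["critical"]
      else acc) []
    PySem.Str.join "|" expanded

def build_severity_regex_py (min_severity : String) : String :=
  pvACore (PySem.Str.lower (PySem.Str.strip min_severity))

-- ===== PORT B =====
def pvRegexTable : PySem.Dict String String :=
  PySem.Dict.ofList
    [("trace",    "trace|debug|info|warn|warning|error|fatal|critical"),
     ("debug",    "debug|info|warn|warning|error|fatal|critical"),
     ("info",     "info|warn|warning|error|fatal|critical"),
     ("warn",     "warn|warning|error|fatal|critical"),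
     ("warning",  "warn|warning|error|fatal|critical"),
     ("error",    "error|fatal|critical"),
     ("fatal",    "fatal|critical"),
     ("critical", "fatal|critical")]

def pvBCore (key : String) : String :=
  match PySem.Dict.get? pvRegexTable key with
  | some r => r
  | none => ""  -- Python: ValueError (outside Pre_)

def build_severity_regex_py_alt (min_severity : String) : String :=
  pvBCore (PySem.Str.lower (PySem.Str.strip min_severity))

-- ===== PRECONDITION & SPEC =====
-- Pre_ excludes exactly the inputs whose normalized form is not a recognized level: there A
-- raises ValueError (and B does too).
def Pre_build_severity_regex_py (min_severity : String) : Prop :=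
  PySem.Str.lower (PySem.Str.strip min_severity) ∈
    ["trace", "debug", "info", "warn", "warning", "error", "fatal", "critical"]
instance (min_severity : String) : Decidable (Pre_build_severity_regex_py min_severity) := by
  unfold Pre_build_severity_regex_py; infer_instance
def pvWitness_build_severity_regex_py : String := " Error "

def Spec_build_severity_regex_py (min_severity : String) (out : String) : Prop :=
  out = build_severity_regex_py_alt min_severity
instance (min_severity : String) (out : String) : Decidable (Spec_build_severity_regex_py min_severity out) := by
  unfold Spec_build_severity_regex_py; infer_instance

-- ===== CLAIM (what is proved, stated in full; the proofs are below) =====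
def Claim_equal_build_severity_regex_py : Prop :=
  ∀ (min_severity : String), Dom_build_severity_regex_py min_severity →
    Pre_build_severity_regex_py min_severity →
    Spec_build_severity_regex_py min_severity (build_severity_regex_py min_severity)

-- ===== LEMMAS AND PROOFS =====
set_option maxHeartbeats 2000000 in
theorem pvCore_eq (n : String)
    (h : n ∈ ["trace", "debug", "info", "warn", "warning", "error", "fatal", "critical"]) :
    pvACore n = pvBCore n := by
  simp only [List.mem_cons, List.not_mem_nil, or_false] at h
  rcases h with h | h | h | h | h | h | h | h <;> subst h <;> decide

-- ===== VERDICT (by name: the statement is the Claim_ definition above) =====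
theorem build_severity_regex_py_spec : Claim_equal_build_severity_regex_py := by
  intro s _ hpre
  unfold Spec_build_severity_regex_py build_severity_regex_py build_severity_regex_py_alt
  exact pvCore_eq _ hpre
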